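-- pv_equiv track=rewrite | github.com/AllenCell/ome-zarr-vole-tools | src/ome_zarr_vole_tools/converter.py | adapt_chunk_size
-- ===== SOURCE A (Python) =====
-- from typing import Any, Dict, List, Literal, Optional, Sequence, Tuple
--
-- def adapt_chunk_size(
--     requested: Tuple[int, ...],
--     shape: Tuple[int, ...],
-- ) -> Tuple[int, ...]:
--     """Clamp each chunk dimension to the actual array dimension."""
--     if len(requested) < len(shape):
--         # Pad with 1s on the left for missing leading dims
--         pad = len(shape) - len(requested)
--         requested = (1,) * pad + requested
--     elif len(requested) > len(shape):
--         # Trim from the left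
--         requested = requested[-len(shape):]
--     return tuple(min(c, s) for c, s in zip(requested, shape))
-- ===== SOURCE B (Python) =====
-- def adapt_chunk_size(requested, shape):
--     """Clamp each chunk dimension to the actual array dimension."""
--     out = []
--     i, j = 0, 0
--     r, n = len(requested), len(shape)
--     while j < n:
--         if r - i > n - j:
--             # extra leading requested entry: never used, skip it
--             i += 1
--         elif r - i < n - j:
--             # missing leading dim: its requested size defaults to 1
--             out.append(min(1, shape[j]))
--             j += 1
--         else:
--             out.append(min(requested[i], shape[j]))
--             i += 1
--             j += 1
--     return tuple(out)
-- ===== Notes on version B (the rewrite author's own statement) =====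
-- stated objective: alternative
-- what changed: Replaces A's staged pad/trim normalisation followed by a zip-min comprehension with a two-pointer while loop over indices into requested and shape that per step either skips an unused extra leading requested entry, appends the default 1 clamped by the dim, or appends the elementwise min into an accumulator, with no padding tuple, no slicing and no zip.
import Mathlib
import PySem

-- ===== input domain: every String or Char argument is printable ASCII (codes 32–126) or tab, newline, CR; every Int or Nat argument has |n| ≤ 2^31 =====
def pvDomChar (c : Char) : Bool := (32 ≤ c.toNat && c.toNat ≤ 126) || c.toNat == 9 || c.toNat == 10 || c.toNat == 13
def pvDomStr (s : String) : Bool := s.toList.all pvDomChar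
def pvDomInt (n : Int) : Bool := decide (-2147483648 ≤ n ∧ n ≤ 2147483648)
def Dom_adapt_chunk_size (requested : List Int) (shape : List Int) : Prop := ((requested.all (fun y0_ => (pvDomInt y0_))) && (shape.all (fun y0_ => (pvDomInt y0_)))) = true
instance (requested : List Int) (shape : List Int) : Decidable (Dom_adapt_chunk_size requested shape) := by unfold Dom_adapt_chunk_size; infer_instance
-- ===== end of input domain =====

-- B replaces A's pad/trim-then-zip with an iterative two-pointer loop appending into an accumulator (objective: alternative decomposition, same cost).

-- ===== PORT A =====
-- literal transliteration of A: pad with 1s on the left / trim from the left, then zip-min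
def adapt_chunk_size (requested : List Int) (shape : List Int) : List Int :=
  let requested' : List Int :=
    if requested.length < shape.length then
      List.replicate (shape.length - requested.length) 1 ++ requested
    else if requested.length > shape.length then
      PySem.List.slice requested (some (-(shape.length : Int))) none
    else requested
  (requested'.zip shape).map (fun cs : Int × Int => min cs.1 cs.2)

-- ===== PORT B =====
-- two-pointer while loop: out accumulator; skip extra leading req / default 1 / min
def adaptGo (out : List Int) (req : List Int) (shp : List Int) : List Int :=
  match shp with
  | [] => out
  | s :: ss =>
    if req.length > (s :: ss).length then adaptGo out (req.drop 1) (s :: ss)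
    else if req.length < (s :: ss).length then adaptGo (out ++ [min 1 s]) req ss
    else adaptGo (out ++ [min (req.headD 0) s]) (req.drop 1) ss
termination_by req.length + shp.length
decreasing_by all_goals (simp only [List.length_drop, List.length_cons]; omega)

def adapt_chunk_size_alt (requested : List Int) (shape : List Int) : List Int :=
  adaptGo [] requested shape

-- ===== PRECONDITION & SPEC =====
def Spec_adapt_chunk_size (requested : List Int) (shape : List Int) (out : List Int) : Prop := out = adapt_chunk_size_alt requested shape
instance (requested : List Int) (shape : List Int) (out : List Int) : Decidable (Spec_adapt_chunk_size requested shape out) := by unfold Spec_adapt_chunk_size; infer_instance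

-- ===== CLAIM =====
def Claim_equal_adapt_chunk_size : Prop := ∀ (requested : List Int) (shape : List Int), Dom_adapt_chunk_size requested shape → Spec_adapt_chunk_size requested shape (adapt_chunk_size requested shape)

-- ===== LEMMAS AND PROOFS =====

-- A's aligned "requested" list, in all three branches, is replicate (n-r) 1 ++ drop (r-n) requested
lemma adapt_A_eq (requested shape : List Int) :
    adapt_chunk_size requested shape =
      ((List.replicate (shape.length - requested.length) 1
          ++ requested.drop (requested.length - shape.length)).zip shape).map
        (fun cs : Int × Int => min cs.1 cs.2) := by
  unfold adapt_chunk_size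
  rcases lt_trichotomy requested.length shape.length with h | h | h
  · simp [h, Nat.sub_eq_zero_of_le h.le]
  · simp [h]
  · have hn : ¬ requested.length < shape.length := by omega
    simp only [hn, if_false, h, if_true]
    rcases Nat.eq_zero_or_pos shape.length with h0 | h0
    · have : shape = [] := List.length_eq_zero_iff.mp h0
      subst this
      simp [PySem.List.slice]
    · rw [PySem.List.slice_from_neg_natCast requested shape.length h0]
      simp [Nat.sub_eq_zero_of_le h.le]

lemma adapt_B_eq (out req shp : List Int) :
    adaptGo out req shp =
      out ++ ((List.replicate (shp.length - req.length) 1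
          ++ req.drop (req.length - shp.length)).zip shp).map
        (fun cs : Int × Int => min cs.1 cs.2) := by
  induction out, req, shp using adaptGo.induct with
  | case1 out req => simp [adaptGo]
  | case2 out req s ss h ih =>
    rw [adaptGo, if_pos h, ih]
    simp only [List.length_cons, List.length_drop] at h ⊢
    have e1 : ss.length + 1 - (req.length - 1) = 0 := by omega
    have e2 : ss.length + 1 - req.length = 0 := by omega
    have e4 : 1 + (req.length - 1 - (ss.length + 1)) = req.length - (ss.length + 1) := by
      omega
    rw [e1, e2, List.drop_drop, e4]
  | case3 out req s ss h1 h2 ih =>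
    rw [adaptGo, if_neg h1, if_pos h2, ih]
    simp only [List.length_cons] at h1 h2 ⊢
    have e1 : req.length - ss.length = 0 := by omega
    have e2 : req.length - (ss.length + 1) = 0 := by omega
    have e3 : ss.length + 1 - req.length = (ss.length - req.length) + 1 := by omega
    rw [e1, e2, e3, List.replicate_succ]
    simp
  | case4 out req s ss h1 h2 ih =>
    have hr : req.length = ss.length + 1 := by
      simp only [List.length_cons] at h1 h2; omega
    rcases req with _ | ⟨a, req⟩
    · simp at hr
    · rw [adaptGo, if_neg h1, if_neg h2, ih]
      simp only [List.length_cons] at hr ⊢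
      have hrr : req.length = ss.length := by omega
      simp [hrr]

-- ===== VERDICT =====
theorem adapt_chunk_size_spec : Claim_equal_adapt_chunk_size := by
  intro requested shape _
  show adapt_chunk_size requested shape = adapt_chunk_size_alt requested shape
  rw [adapt_A_eq]
  unfold adapt_chunk_size_alt
  rw [adapt_B_eq, List.nil_append]
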